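-- pv_equiv track=rewrite | github.com/yifshuai/2025-CarDreamer-Project | waypoint_to_move_segmenter.py | concentrate_moves
-- ===== SOURCE A (Python) =====
-- import math as m
--
-- def most_common(input_list,classes):
--   classes_count=[0]*len(classes)
--   for i in range(len(input_list)):
--     if input_list[i] in classes:
--       idx=classes.index(input_list[i])
--       classes_count[idx]+=1
--   return classes[classes_count.index(max(classes_count))]
--
-- def concentrate_moves(move_list,num_clusters=10,classes=['f','b','l','r']):
--   new_move_list=[]
--   coord_list=[]
--   cluster_size=len(move_list)/num_clusters
--   for i in range(num_clusters):
--     if i==num_clusters: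
--       most_common_move=most_common(move_list[m.ceil(i*cluster_size):],classes)
--       new_move_list.append(most_common_move)
--       coord_list.append([m.ceil(i*cluster_size),len(move_list)])
--     else:
--       most_common_move=most_common(move_list[m.ceil(i*cluster_size):m.ceil((i+1)*cluster_size)],classes)
--       new_move_list.append(most_common_move)
--       coord_list.append([m.ceil(i*cluster_size),m.ceil((i+1)*cluster_size-1)])
--   return new_move_list,coord_list
-- ===== SOURCE B (Python) =====
-- import math as m
--
-- def concentrate_moves(move_list, num_clusters=10, classes=['f','b','l','r']):
--     n = len(move_list)
--     cluster_size = n / num_clusters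
--     bounds = [m.ceil(i * cluster_size) for i in range(num_clusters + 1)]
--     pos = {}
--     for t, name in enumerate(classes):
--         if name not in pos:
--             pos[name] = t
--     counts = [[0] * len(classes) for _ in range(num_clusters)]
--     for j, mv in enumerate(move_list):
--         t = pos.get(mv)
--         if t is None:
--             continue
--         c = 0
--         while c < num_clusters and j >= bounds[c + 1]:
--             c += 1
--         if c < num_clusters:
--             counts[c][t] += 1
--     new_move_list = []
--     coord_list = []
--     for i in range(num_clusters):
--         row = counts[i]
--         best = 0
--         for t in range(1, len(row)):
--             if row[t] > row[best]:
--                 best = t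
--         new_move_list.append(classes[best])
--         coord_list.append([bounds[i], m.ceil((i + 1) * cluster_size - 1)])
--     return new_move_list, coord_list
-- ===== Notes on version B (the rewrite author's own statement) =====
-- stated objective: alternative
-- what changed: A slices the list per cluster and rescans each slice (plus a classes.index scan per element) to find the majority; B precomputes the boundary array once, makes one distributing pass over move_list that locates each element's cluster within the boundaries and increments a num_clusters x len(classes) counts matrix (class indices via a dict built once), then reads each cluster's majority off its count row by a first-argmax scan.
-- outside the precondition, e.g. on concentrate_moves([], 0, ['f']): A raises ZeroDivisionError, B raises ZeroDivisionError; on concentrate_moves(['z'], 2, []): A raises ValueError, B raises IndexError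
import Mathlib
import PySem

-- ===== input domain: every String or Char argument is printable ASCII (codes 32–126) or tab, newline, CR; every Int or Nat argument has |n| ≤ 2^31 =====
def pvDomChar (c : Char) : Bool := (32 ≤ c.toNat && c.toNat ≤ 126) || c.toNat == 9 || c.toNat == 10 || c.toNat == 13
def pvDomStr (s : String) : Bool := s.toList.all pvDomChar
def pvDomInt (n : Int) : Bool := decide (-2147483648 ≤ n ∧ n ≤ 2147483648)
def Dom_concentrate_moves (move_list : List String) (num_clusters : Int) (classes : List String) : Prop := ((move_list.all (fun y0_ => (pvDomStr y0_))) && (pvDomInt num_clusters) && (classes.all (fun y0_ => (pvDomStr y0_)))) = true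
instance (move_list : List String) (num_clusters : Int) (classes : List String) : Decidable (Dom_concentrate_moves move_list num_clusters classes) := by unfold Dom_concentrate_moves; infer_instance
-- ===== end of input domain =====

-- B re-implements A's per-cluster slice-and-rescan as one distributing pass over the list
-- into a counts matrix (objective: alternative decomposition; equivalence proved on Pre_).

-- ===== shared binary64 helpers =====
-- Python computes `len(move_list)/num_clusters` and the boundary expressions in IEEE-754
-- binary64 floats.  Both Pythons perform the SAME float expressions; these helpers model
-- those double operations exactly (as dyadic pairs (mantissa, exponent), value m·2^e) on
-- the values arising here (no overflow/underflow is reachable on this domain).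

/-- round `m` to a multiple of `2^s`, round-half-to-even on the quotient. -/
def pvRoundAt (m : Int) (s : Nat) : Int :=
  let d : Int := 2 ^ s
  let q : Int := Int.fdiv m d
  let r : Int := m - q * d
  let q' : Int := if 2 * r < d then q else if d < 2 * r then q + 1 else if q % 2 = 0 then q else q + 1
  q' * d

/-- how many low bits must be rounded away to leave a 53-bit mantissa. -/
def pvShift (m : Int) : Nat := PySem.Int.bitLength m - 53

/-- renormalize an exact dyadic value to binary64 precision. -/
def pvNorm (p : Int × Int) : Int × Int := (pvRoundAt p.1 (pvShift p.1), p.2)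

/-- floor of log₂(a/b) for a, b > 0. -/
def pvILog (a b : Int) : Int :=
  let e0 : Int := (PySem.Int.bitLength a : Int) - (PySem.Int.bitLength b : Int)
  if (if 0 ≤ e0 then b * 2 ^ e0.toNat ≤ a else b ≤ a * 2 ^ (-e0).toNat) then e0 else e0 - 1

/-- binary64 `a / b` (exact for 0 ≤ a, 0 < b; `b = 0` — Python ZeroDivisionError — is
excluded by `Pre_`, and for b < 0 the result is unused by both programs). -/
def pvFDiv (a b : Int) : Int × Int :=
  if a = 0 then (0, 0) else
  let e : Int := pvILog a b
  let s : Int := 52 - e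
  let num : Int := if 0 ≤ s then a * 2 ^ s.toNat else a
  let den : Int := if 0 ≤ s then b else b * 2 ^ (-s).toNat
  let q : Int := Int.fdiv num den
  let r : Int := num - q * den
  let m : Int := if 2 * r < den then q else if den < 2 * r then q + 1 else if q % 2 = 0 then q else q + 1
  (m, e - 52)

/-- binary64 `i * x` for a Python int `i` (|i| < 2^53 here, so the int→float conversion is exact). -/
def pvFMul (i : Int) (x : Int × Int) : Int × Int := pvNorm (i * x.1, x.2)

/-- binary64 `x - 1`. -/
def pvFSub1 (x : Int × Int) : Int × Int :=
  if 0 ≤ x.2 then pvNorm (x.1 * 2 ^ x.2.toNat - 1, 0) else pvNorm (x.1 - 2 ^ (-x.2).toNat, x.2)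

/-- `math.ceil` of a dyadic value. -/
def pvFCeil (x : Int × Int) : Int :=
  if 0 ≤ x.2 then x.1 * 2 ^ x.2.toNat else -(Int.fdiv (-x.1) (2 ^ (-x.2).toNat))

-- ===== PORT A =====
def most_common (input_list : List String) (classes : List String) : String :=
  let classes_count : List Int := PySem.List.pyRepeat [(0 : Int)] (PySem.List.len classes)
  let classes_count :=
    (PySem.List.pyRange 0 (PySem.List.len input_list) 1).foldl (fun cc i =>
      if PySem.List.pyGetD input_list i "" ∈ classes then
        match PySem.List.index? classes (PySem.List.pyGetD input_list i "") with
        | some idx => PySem.List.pySetD cc (idx : Int) (PySem.List.pyGetD cc (idx : Int) 0 + 1)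
        | none => cc
      else cc) classes_count
  match PySem.List.max? classes_count (fun v => v) with
  | none => ""        -- Python: max([]) raises ValueError (only when classes = []; outside Pre_)
  | some mx =>
    match PySem.List.index? classes_count mx with
    | none => ""      -- unreachable: mx ∈ classes_count
    | some j => PySem.List.pyGetD classes (j : Int) ""

def concentrate_moves (move_list : List String) (num_clusters : Int) (classes : List String) : List String × List (List Int) :=
  let cluster_size := pvFDiv (PySem.List.len move_list) num_clusters
  (PySem.List.pyRange 0 num_clusters 1).foldl (fun (acc : List String × List (List Int)) i =>
    if i == num_clusters then
      (acc.1 ++ [most_common (PySem.List.slice move_list (some (pvFCeil (pvFMul i cluster_size))) none) classes],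
       acc.2 ++ [[pvFCeil (pvFMul i cluster_size), PySem.List.len move_list]])
    else
      (acc.1 ++ [most_common (PySem.List.slice move_list (some (pvFCeil (pvFMul i cluster_size)))
                    (some (pvFCeil (pvFMul (i + 1) cluster_size)))) classes],
       acc.2 ++ [[pvFCeil (pvFMul i cluster_size), pvFCeil (pvFSub1 (pvFMul (i + 1) cluster_size))]]))
    ([], [])

-- ===== PORT B =====
/-- the `while c < num_clusters and j >= bounds[c + 1]: c += 1` loop of Source B. -/
def pvClusterOf (bounds : List Int) (k : Int) (j : Int) (c : Int) : Int :=
  if h : c < k ∧ PySem.List.pyGetD bounds (c + 1) 0 ≤ j then pvClusterOf bounds k j (c + 1) else c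
termination_by (k - c).toNat
decreasing_by omega

/-- first index of the maximum of a row (Source B's `best_of`). -/
def pvBestOf (row : List Int) : Int :=
  (PySem.List.pyRange 1 (PySem.List.len row) 1).foldl
    (fun best t => if PySem.List.pyGetD row best 0 < PySem.List.pyGetD row t 0 then t else best) 0

def concentrate_moves_alt (move_list : List String) (num_clusters : Int) (classes : List String) : List String × List (List Int) :=
  let n := PySem.List.len move_list
  let cluster_size := pvFDiv n num_clusters
  let bounds := (PySem.List.pyRange 0 (num_clusters + 1) 1).map (fun i => pvFCeil (pvFMul i cluster_size))
  let pos : PySem.Dict String Int :=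
    (PySem.List.enumerate classes 0).foldl (fun d p => if d.contains p.2 then d else d.insert p.2 p.1) PySem.Dict.empty
  let counts0 := (PySem.List.pyRange 0 num_clusters 1).map (fun _ => PySem.List.pyRepeat [(0 : Int)] (PySem.List.len classes))
  let counts :=
    (PySem.List.enumerate move_list 0).foldl (fun cnts p =>
      match PySem.Dict.get? pos p.2 with
      | none => cnts
      | some t =>
        let c := pvClusterOf bounds num_clusters p.1 0
        if c < num_clusters then
          PySem.List.pySetD cnts c
            (PySem.List.pySetD (PySem.List.pyGetD cnts c []) t (PySem.List.pyGetD (PySem.List.pyGetD cnts c []) t 0 + 1))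
        else cnts) counts0
  ((PySem.List.pyRange 0 num_clusters 1).map (fun i =>
      PySem.List.pyGetD classes (pvBestOf (PySem.List.pyGetD counts i [])) ""),
   (PySem.List.pyRange 0 num_clusters 1).map (fun i =>
      [PySem.List.pyGetD bounds i 0, pvFCeil (pvFSub1 (pvFMul (i + 1) cluster_size))]))

-- ===== PRECONDITION & SPEC =====
-- Pre_ excludes exactly the inputs where the Python A raises: num_clusters = 0
-- (ZeroDivisionError in `len(move_list)/num_clusters`) and num_clusters > 0 with
-- classes = [] (ValueError from `max([])` in most_common).
def Pre_concentrate_moves (move_list : List String) (num_clusters : Int) (classes : List String) : Prop :=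
  num_clusters ≠ 0 ∧ (0 < num_clusters → classes ≠ [])
instance (move_list : List String) (num_clusters : Int) (classes : List String) : Decidable (Pre_concentrate_moves move_list num_clusters classes) := by unfold Pre_concentrate_moves; infer_instance

def pvWitness_concentrate_moves : List String × Int × List String := (["f", "b", "f"], 2, ["f", "b", "l", "r"])

def Spec_concentrate_moves (move_list : List String) (num_clusters : Int) (classes : List String) (out : List String × List (List Int)) : Prop := out = concentrate_moves_alt move_list num_clusters classes
instance (move_list : List String) (num_clusters : Int) (classes : List String) (out : List String × List (List Int)) : Decidable (Spec_concentrate_moves move_list num_clusters classes out) := by unfold Spec_concentrate_moves; infer_instance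

-- ===== CLAIM (what is proved, stated in full; the proofs are below) =====
def Claim_equal_concentrate_moves : Prop := ∀ (move_list : List String) (num_clusters : Int) (classes : List String), Dom_concentrate_moves move_list num_clusters classes → Pre_concentrate_moves move_list num_clusters classes → Spec_concentrate_moves move_list num_clusters classes (concentrate_moves move_list num_clusters classes)

-- ===== LEMMAS AND PROOFS =====

-- proof-side names for the two step functions of the ports
def pvRowStep (pos : PySem.Dict String Int) : List Int → String → List Int := fun row x =>
  match PySem.Dict.get? pos x with
  | none => row
  | some t => PySem.List.pySetD row t (PySem.List.pyGetD row t 0 + 1)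

def pvStepB (pos : PySem.Dict String Int) (bounds : List Int) (k : Int) :
    List (List Int) → (Int × String) → List (List Int) := fun cnts p =>
  match PySem.Dict.get? pos p.2 with
  | none => cnts
  | some t =>
    let c := pvClusterOf bounds k p.1 0
    if c < k then
      PySem.List.pySetD cnts c
        (PySem.List.pySetD (PySem.List.pyGetD cnts c []) t (PySem.List.pyGetD (PySem.List.pyGetD cnts c []) t 0 + 1))
    else cnts

def pvBnd (cs : Int × Int) (i : Int) : Int := pvFCeil (pvFMul i cs)

lemma pv_fdiv_nonneg_den (a b : Int) (h : 0 ≤ b) : Int.fdiv a b = a / b := by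
  rw [Int.fdiv_eq_ediv]; simp [h]

lemma pvRoundAt_cases (m : Int) (s : Nat) :
    pvRoundAt m s = (m / (2^s)) * 2^s ∨ pvRoundAt m s = (m / (2^s) + 1) * 2^s := by
  have h := pv_fdiv_nonneg_den m (2^s) (by positivity)
  simp only [pvRoundAt, h]
  split_ifs <;> simp

lemma pvRoundAt_mono (s : Nat) {a b : Int} (h : a ≤ b) : pvRoundAt a s ≤ pvRoundAt b s := by
  have hd : (0:Int) < 2^s := by positivity
  have hfa := pv_fdiv_nonneg_den a (2^s) hd.le
  have hfb := pv_fdiv_nonneg_den b (2^s) hd.le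
  have hq : a / 2^s ≤ b / 2^s := Int.ediv_le_ediv hd h
  have ha1 : 2^s * (a / 2^s) + a % 2^s = a := Int.mul_ediv_add_emod a _
  have hb1 : 2^s * (b / 2^s) + b % 2^s = b := Int.mul_ediv_add_emod b _
  rcases eq_or_lt_of_le hq with heq | hlt
  · simp only [pvRoundAt, hfa, hfb, ← heq]
    split_ifs <;> nlinarith [hd]
  · have h1 : pvRoundAt a s ≤ (a / 2^s + 1) * 2^s := by
      rcases pvRoundAt_cases a s with hc | hc <;> rw [hc] <;> nlinarith
    have h2 : (b / 2^s) * 2^s ≤ pvRoundAt b s := by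
      rcases pvRoundAt_cases b s with hc | hc <;> rw [hc] <;> nlinarith
    have h3 : (a / 2^s + 1) * 2^s ≤ (b / 2^s) * 2^s := by nlinarith
    omega

lemma pvRoundAt_le_two_pow {a : Int} {s L : Nat} (_ha : 0 ≤ a) (hL : a < 2^L) (hs : s ≤ L) :
    pvRoundAt a s ≤ 2^L := by
  have hd : (0:Int) < 2^s := by positivity
  have hdvd : (2:Int)^L = 2^(L-s) * 2^s := by rw [← pow_add]; congr 1; omega
  have ha1 : 2^s * (a / 2^s) + a % 2^s = a := Int.mul_ediv_add_emod a _
  have ha2 : 0 ≤ a % 2^s := Int.emod_nonneg a (by positivity)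
  have hqlt : a / 2^s + 1 ≤ 2^(L-s) := by nlinarith
  rcases pvRoundAt_cases a s with hc | hc <;> rw [hc, hdvd] <;> nlinarith

lemma two_pow_le_pvRoundAt {a : Int} {s P : Nat} (h : 2^P ≤ a) (hs : s ≤ P) :
    2^P ≤ pvRoundAt a s := by
  have hd : (0:Int) < 2^s := by positivity
  have hdvd : (2:Int)^P = 2^(P-s) * 2^s := by rw [← pow_add]; congr 1; omega
  have ha1 : 2^s * (a / 2^s) + a % 2^s = a := Int.mul_ediv_add_emod a _
  have ha3 : a % 2^s < 2^s := Int.emod_lt_of_pos a hd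
  have hqge : 2^(P-s) ≤ a / 2^s := by nlinarith
  rcases pvRoundAt_cases a s with hc | hc <;> rw [hc, hdvd] <;> nlinarith

-- bitLength facts for nonnegative ints
lemma pv_lt_two_pow_bitLength {a : Int} (ha : 0 ≤ a) : a < 2^(PySem.Int.bitLength a) := by
  have h := PySem.Int.lt_two_pow_bitLength a
  zify at h
  rwa [abs_of_nonneg ha] at h

lemma pv_two_pow_bitLength_le {a : Int} (ha : 0 < a) : 2^(PySem.Int.bitLength a - 1) ≤ a := by
  have h := PySem.Int.two_pow_bitLength_le a (by omega)
  zify at h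
  rwa [abs_of_nonneg ha.le] at h

lemma pv_bitLength_mono {a b : Int} (ha : 0 ≤ a) (h : a ≤ b) :
    PySem.Int.bitLength a ≤ PySem.Int.bitLength b := by
  by_contra hc
  rcases eq_or_lt_of_le ha with ha0 | ha0
  · rw [← ha0] at hc; simp [PySem.Int.bitLength_zero] at hc
  · have h1 : 2^(PySem.Int.bitLength a - 1) ≤ a := pv_two_pow_bitLength_le ha0
    have h2 : b < 2^(PySem.Int.bitLength b) := pv_lt_two_pow_bitLength (by omega)
    have h3 : (2:Int)^(PySem.Int.bitLength b) ≤ 2^(PySem.Int.bitLength a - 1) := by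
      apply pow_le_pow_right₀ (by norm_num); omega
    omega

lemma pvMant_mono {a b : Int} (ha : 0 ≤ a) (h : a ≤ b) :
    pvRoundAt a (pvShift a) ≤ pvRoundAt b (pvShift b) := by
  have hbl := pv_bitLength_mono ha h
  rcases Nat.eq_or_lt_of_le (show pvShift a ≤ pvShift b by unfold pvShift; omega) with heq | hlt
  · rw [heq]; exact pvRoundAt_mono _ h
  · have hLb : 53 < PySem.Int.bitLength b := by unfold pvShift at hlt; omega
    have hb0 : 0 < b := by
      rcases eq_or_lt_of_le (show 0 ≤ b by omega) with h0 | h0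
      · exfalso; rw [← h0] at hLb; simp [PySem.Int.bitLength_zero] at hLb
      · exact h0
    have h1 : pvRoundAt a (pvShift a) ≤ 2^(PySem.Int.bitLength a) :=
      pvRoundAt_le_two_pow ha (pv_lt_two_pow_bitLength ha) (by unfold pvShift; omega)
    have h2 : (2:Int)^(PySem.Int.bitLength b - 1) ≤ pvRoundAt b (pvShift b) :=
      two_pow_le_pvRoundAt (pv_two_pow_bitLength_le hb0) (by unfold pvShift; omega)
    have h3 : (2:Int)^(PySem.Int.bitLength a) ≤ 2^(PySem.Int.bitLength b - 1) :=
      pow_le_pow_right₀ (by norm_num) (by unfold pvShift at hlt; omega)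
    omega

lemma pvFMul_exp (i : Int) (x : Int × Int) : (pvFMul i x).2 = x.2 := rfl

lemma pvFMul_fst (i : Int) (x : Int × Int) :
    (pvFMul i x).1 = pvRoundAt (i * x.1) (pvShift (i * x.1)) := rfl

lemma pvFMul_fst_mono {i j : Int} (x : Int × Int) (hm : 0 ≤ x.1) (hi : 0 ≤ i) (hij : i ≤ j) :
    (pvFMul i x).1 ≤ (pvFMul j x).1 := by
  rw [pvFMul_fst, pvFMul_fst]
  exact pvMant_mono (by positivity) (by nlinarith)

lemma pvFCeil_mono {m1 m2 e : Int} (h : m1 ≤ m2) : pvFCeil (m1, e) ≤ pvFCeil (m2, e) := by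
  unfold pvFCeil
  dsimp only
  split_ifs with he
  · have : (0:Int) ≤ 2 ^ e.toNat := by positivity
    nlinarith
  · have hd : (0:Int) < 2 ^ (-e).toNat := by positivity
    rw [pv_fdiv_nonneg_den _ _ hd.le, pv_fdiv_nonneg_den _ _ hd.le]
    have := Int.ediv_le_ediv hd (show -m2 ≤ -m1 by omega)
    omega

lemma pvRoundAt_zero (s : Nat) : pvRoundAt 0 s = 0 := by
  have hd : (0:Int) < 2^s := by positivity
  have h := pv_fdiv_nonneg_den 0 (2^s) hd.le
  simp only [pvRoundAt, h]
  split_ifs <;> simp_all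

lemma pvFMul_zero_fst (x : Int × Int) : (pvFMul 0 x).1 = 0 := by
  rw [pvFMul_fst]; simp [pvRoundAt_zero]

lemma pvFCeil_zero (e : Int) : pvFCeil (0, e) = 0 := by
  unfold pvFCeil
  split_ifs <;> simp [Int.fdiv]

lemma pvFDiv_fst_nonneg {a b : Int} (ha : 0 ≤ a) (hb : 0 < b) : 0 ≤ (pvFDiv a b).1 := by
  unfold pvFDiv
  split_ifs with h0
  · simp
  · simp only
    set s : Int := 52 - pvILog a b with hs
    by_cases hsn : 0 ≤ s
    · simp only [if_pos hsn]
      have hden : (0:Int) < b := hb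
      have hnum : (0:Int) ≤ a * 2 ^ s.toNat := by positivity
      have hq : 0 ≤ Int.fdiv (a * 2 ^ s.toNat) b := by
        rw [pv_fdiv_nonneg_den _ _ hb.le]; exact Int.ediv_nonneg hnum hb.le
      split_ifs <;> omega
    · simp only [if_neg hsn]
      have hden : (0:Int) < b * 2 ^ (-s).toNat := by positivity
      have hq : 0 ≤ Int.fdiv a (b * 2 ^ (-s).toNat) := by
        rw [pv_fdiv_nonneg_den _ _ hden.le]; exact Int.ediv_nonneg ha hden.le
      split_ifs <;> omega

lemma pvClusterOf_props (bounds : List Int) (k j : Int) :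
    ∀ (n : Nat) (c : Int), (k - c).toNat ≤ n → 0 ≤ c → c ≤ k →
      c ≤ pvClusterOf bounds k j c ∧ pvClusterOf bounds k j c ≤ k ∧
      (pvClusterOf bounds k j c < k → j < PySem.List.pyGetD bounds (pvClusterOf bounds k j c + 1) 0) ∧
      (∀ c', c ≤ c' → c' < pvClusterOf bounds k j c → PySem.List.pyGetD bounds (c' + 1) 0 ≤ j) := by
  intro n
  induction n with
  | zero =>
    intro c hn h0 hk
    rw [pvClusterOf, dif_neg (by omega)]
    exact ⟨le_refl _, hk, by omega, fun c' h1 h2 => by omega⟩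
  | succ n ih =>
    intro c hn h0 hk
    rw [pvClusterOf]
    by_cases hcond : c < k ∧ PySem.List.pyGetD bounds (c + 1) 0 ≤ j
    · rw [dif_pos hcond]
      obtain ⟨ih1, ih2, ih3, ih4⟩ := ih (c + 1) (by omega) (by omega) (by omega)
      refine ⟨by omega, ih2, ih3, ?_⟩
      intro c' h1 h2
      rcases eq_or_lt_of_le h1 with he | hlt
      · rw [← he]; exact hcond.2
      · exact ih4 c' (by omega) h2
    · rw [dif_neg hcond]
      refine ⟨le_refl _, hk, fun hlt => ?_, fun c' h1 h2 => by omega⟩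
      by_contra hno
      exact hcond ⟨hlt, by omega⟩

lemma pv_pos_get (classes : List String) :
    ∀ x, PySem.Dict.get? ((PySem.List.enumerate classes 0).foldl
        (fun d p => if d.contains p.2 then d else d.insert p.2 p.1) PySem.Dict.empty) x
      = Option.map (fun u : Nat => (u : Int)) (PySem.List.index? classes x) := by
  induction classes using List.reverseRecOn with
  | nil =>
    intro x
    simp [PySem.List.enumerate_nil, PySem.Dict.get?_empty]
  | append_singleton l c ih =>
    intro x
    rw [PySem.List.enumerate_append, List.foldl_append]
    rw [PySem.List.enumerate_cons, PySem.List.enumerate_nil]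
    simp only [List.foldl_cons, List.foldl_nil]
    set P := (PySem.List.enumerate l 0).foldl
        (fun d p => if d.contains p.2 then d else d.insert p.2 p.1) PySem.Dict.empty with hP
    by_cases hc : c ∈ l
    · obtain ⟨u, hu⟩ : ∃ u, PySem.List.index? l c = some u := by
        cases h : PySem.List.index? l c with
        | none => exact absurd ((PySem.List.index?_eq_none_iff l c).mp h) (by simp [hc])
        | some u => exact ⟨u, rfl⟩
      have hcont : P.contains c = true := by
        rw [PySem.Dict.contains_eq_isSome_get?, ih c, hu]
        rfl
      rw [if_pos hcont, ih x]
      by_cases hx : x ∈ l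
      · rw [PySem.List.index?_append_of_mem [c] hx]
      · rw [(PySem.List.index?_eq_none_iff _ _).mpr hx,
          (PySem.List.index?_eq_none_iff _ _).mpr (by
            intro hmem
            rcases List.mem_append.mp hmem with h | h
            · exact hx h
            · rw [List.mem_singleton] at h; rw [h] at hx; exact hx hc)]
    · have hcont : P.contains c = false := by
        rw [PySem.Dict.contains_eq_isSome_get?, ih c,
          (PySem.List.index?_eq_none_iff l c).mpr hc]
        rfl
      rw [if_neg (by simp [hcont])]
      by_cases hxc : x = c
      · subst hxc
        rw [PySem.Dict.get?_insert_self, PySem.List.index?_append_singleton_self _ _ hc]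
        simp
      · rw [PySem.Dict.get?_insert_of_ne (hne := hxc), ih x]
        by_cases hx : x ∈ l
        · rw [PySem.List.index?_append_of_mem [c] hx]
        · rw [(PySem.List.index?_eq_none_iff _ _).mpr hx,
            (PySem.List.index?_eq_none_iff _ _).mpr (by
              intro hmem
              rcases List.mem_append.mp hmem with h | h
              · exact hx h
              · rw [List.mem_singleton] at h; exact hxc h)]

lemma pv_best_inv (row : List Int) :
    ∀ (n : Nat) (s : Int) (b : Nat), ((row.length : Int) - s).toNat ≤ n → (b : Int) < s →
      b < row.length →
      (∀ u : Nat, (u : Int) < s → u < row.length → row.getD u 0 ≤ row.getD b 0) →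
      (∀ u : Nat, u < b → row.getD u 0 < row.getD b 0) →
      ∃ bn : Nat,
        (PySem.List.pyRange s (PySem.List.len row) 1).foldl
          (fun best t => if PySem.List.pyGetD row best 0 < PySem.List.pyGetD row t 0 then t else best)
          (b : Int) = (bn : Int) ∧
        bn < row.length ∧
        (∀ u : Nat, u < row.length → row.getD u 0 ≤ row.getD bn 0) ∧
        (∀ u : Nat, u < bn → row.getD u 0 < row.getD bn 0) := by
  intro n
  induction n with
  | zero =>
    intro s b hn hb hblen hmax hfirst
    rw [PySem.List.len_eq, PySem.List.pyRange_one_eq_nil (by omega)]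
    exact ⟨b, rfl, hblen, fun u hu => hmax u (by omega) hu, hfirst⟩
  | succ n ih =>
    intro s b hn hb hblen hmax hfirst
    by_cases hsl : (row.length : Int) ≤ s
    · rw [PySem.List.len_eq, PySem.List.pyRange_one_eq_nil (by omega)]
      exact ⟨b, rfl, hblen, fun u hu => hmax u (by omega) hu, hfirst⟩
    · rw [PySem.List.len_eq, PySem.List.pyRange_one_cons (by omega), List.foldl_cons]
      have hs0 : 0 ≤ s := by omega
      have hsnat : s = ((s.toNat : Nat) : Int) := by omega
      have hget_b : PySem.List.pyGetD row (b : Int) 0 = row.getD b 0 := PySem.List.pyGetD_natCast row b 0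
      have hget_s : PySem.List.pyGetD row s 0 = row.getD s.toNat 0 := by
        rw [hsnat]; exact PySem.List.pyGetD_natCast row s.toNat 0
      by_cases hlt : PySem.List.pyGetD row (b : Int) 0 < PySem.List.pyGetD row s 0
      · rw [if_pos hlt]
        rw [hget_b, hget_s] at hlt
        have := ih (s + 1) s.toNat (by omega) (by omega) (by omega)
          (fun u hu hul => by
            rcases Nat.lt_or_ge u s.toNat with h | h
            · exact le_trans (hmax u (by omega) hul) (le_of_lt hlt)
            · have : u = s.toNat := by omega
              rw [this])
          (fun u hu => by
            rcases Nat.lt_or_ge u b with h | h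
            · exact lt_trans (hfirst u h) hlt
            · exact lt_of_le_of_lt (hmax u (by omega) (by omega)) hlt)
        rw [← hsnat] at this
        exact this
      · rw [if_neg hlt]
        rw [hget_b, hget_s] at hlt
        have := ih (s + 1) b (by omega) (by omega) hblen
          (fun u hu hul => by
            rcases Nat.lt_or_ge u s.toNat with h | h
            · exact hmax u (by omega) hul
            · have : u = s.toNat := by omega
              rw [this]; omega)
          hfirst
        exact this

lemma pv_best_spec (row : List Int) (hrow : row ≠ []) :
    ∃ bn : Nat, pvBestOf row = (bn : Int) ∧ bn < row.length ∧
      (∀ u : Nat, u < row.length → row.getD u 0 ≤ row.getD bn 0) ∧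
      (∀ u : Nat, u < bn → row.getD u 0 < row.getD bn 0) := by
  have hlen : 0 < row.length := List.length_pos_iff.mpr hrow
  have h := pv_best_inv row row.length 1 0 (by omega) (by omega) hlen
    (fun u hu hul => by
      have : u = 0 := by omega
      rw [this])
    (fun u hu => by omega)
  exact h


lemma pv_rowfold_len (pos : PySem.Dict String Int) :
    ∀ (l : List String) (row : List Int), (l.foldl (pvRowStep pos) row).length = row.length := by
  intro l
  induction l with
  | nil => intro row; rfl
  | cons x l ih =>
    intro row
    rw [List.foldl_cons]
    rw [ih]
    unfold pvRowStep
    cases hg : PySem.Dict.get? pos x with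
    | none => rfl
    | some t => simp [PySem.List.length_pySetD]

lemma pv_bnd_mono (cs : Int × Int) (h : 0 ≤ cs.1) {i j : Int} (hi : 0 ≤ i) (hij : i ≤ j) :
    pvBnd cs i ≤ pvBnd cs j := by
  unfold pvBnd
  have h1 := pvFMul_fst_mono cs h hi hij
  rw [show pvFMul i cs = ((pvFMul i cs).1, cs.2) from by
        rw [← pvFMul_exp i cs],
      show pvFMul j cs = ((pvFMul j cs).1, cs.2) from by
        rw [← pvFMul_exp j cs]]
  · exact pvFCeil_mono h1

lemma pv_bnd_zero (cs : Int × Int) : pvBnd cs 0 = 0 := by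
  unfold pvBnd
  rw [show pvFMul 0 cs = ((0 : Int), cs.2) from
        Prod.ext_iff.mpr ⟨pvFMul_zero_fst cs, pvFMul_exp 0 cs⟩]
  exact pvFCeil_zero cs.2

lemma pv_bnd_nonneg (cs : Int × Int) (h : 0 ≤ cs.1) {i : Int} (hi : 0 ≤ i) : 0 ≤ pvBnd cs i := by
  rw [← pv_bnd_zero cs]
  exact pv_bnd_mono cs h (le_refl 0) hi

lemma pv_cluster_iff (cs : Int × Int) (hcs : 0 ≤ cs.1) (k : Int) (hk : 0 < k) (j : Int)
    (hj : 0 ≤ j) (i : Int) (hi0 : 0 ≤ i) (hik : i < k) :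
    (pvClusterOf ((PySem.List.pyRange 0 (k + 1) 1).map (fun x => pvFCeil (pvFMul x cs))) k j 0 = i)
      ↔ (pvBnd cs i ≤ j ∧ j < pvBnd cs (i + 1)) := by
  set bounds := (PySem.List.pyRange 0 (k + 1) 1).map (fun x => pvFCeil (pvFMul x cs)) with hbounds
  have hbget : ∀ c : Int, 0 ≤ c → c ≤ k → PySem.List.pyGetD bounds c 0 = pvBnd cs c := by
    intro c h1 h2
    rw [hbounds]
    exact PySem.List.pyGetD_map_pyRange_of_nonneg _ (k + 1) c 0 h1 (by omega)
  obtain ⟨hc1, hc2, hc3, hc4⟩ :=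
    pvClusterOf_props bounds k j (k - 0).toNat 0 (le_refl _) (le_refl 0) hk.le
  set r := pvClusterOf bounds k j 0 with hr
  constructor
  · intro hri
    rw [← hri]
    constructor
    · rcases eq_or_lt_of_le hc1 with h0 | h0
      · rw [← h0, pv_bnd_zero]; exact hj
      · have := hc4 (r - 1) (by omega) (by omega)
        rw [show r - 1 + 1 = r by omega] at this
        rw [hbget r (by omega) (by omega)] at this
        exact this
    · have := hc3 (by omega)
      rw [hbget (r + 1) (by omega) (by omega)] at this
      exact this
  · rintro ⟨hlo, hhi⟩
    by_contra hne
    rcases lt_trichotomy r i with h | h | h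
    · have h1 := hc3 (by omega)
      rw [hbget (r + 1) (by omega) (by omega)] at h1
      have h2 : pvBnd cs (r + 1) ≤ pvBnd cs i := pv_bnd_mono cs hcs (by omega) (by omega)
      omega
    · exact hne h
    · have h1 := hc4 i hi0 h
      rw [hbget (i + 1) (by omega) (by omega)] at h1
      omega

lemma pv_foldB_row (pos : PySem.Dict String Int) (bounds : List Int) (k : Int) (i : Nat)
    (hik : (i : Int) < k) :
    ∀ (l : List (Int × String)) (cnts : List (List Int)), cnts.length = k.toNat →
      PySem.List.pyGetD (l.foldl (pvStepB pos bounds k) cnts) (i : Int) [] =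
        ((l.filter (fun p => pvClusterOf bounds k p.1 0 == (i : Int))).map Prod.snd).foldl
          (pvRowStep pos) (PySem.List.pyGetD cnts (i : Int) []) := by
  intro l
  induction l with
  | nil => intro cnts h; rfl
  | cons p l ihl =>
    intro cnts hlen
    rw [List.foldl_cons, List.filter_cons]
    cases hg : PySem.Dict.get? pos p.2 with
    | none =>
      have hstep : pvStepB pos bounds k cnts p = cnts := by unfold pvStepB; rw [hg]
      rw [hstep]
      by_cases hcl : (pvClusterOf bounds k p.1 0 == (i : Int)) = true
      · simp only [hcl, if_true, List.map_cons, List.foldl_cons]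
        have hrs : pvRowStep pos (PySem.List.pyGetD cnts (i : Int) []) p.2
            = PySem.List.pyGetD cnts (i : Int) [] := by unfold pvRowStep; rw [hg]
        rw [ihl cnts hlen, hrs]
      · simp only [Bool.not_eq_true] at hcl
        simp only [hcl, Bool.false_eq_true, if_false]
        exact ihl cnts hlen
    | some t =>
      obtain ⟨hc1, hc2, hc3, hc4⟩ :=
        pvClusterOf_props bounds k p.1 (k - 0).toNat 0 (le_refl _) (le_refl 0) (by omega)
      set c := pvClusterOf bounds k p.1 0 with hcdef
      by_cases hck : c < k
      · have hclt : c.toNat < cnts.length := by omega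
        set X := PySem.List.pySetD (PySem.List.pyGetD cnts c []) t
            (PySem.List.pyGetD (PySem.List.pyGetD cnts c []) t 0 + 1) with hX
        have hstep : pvStepB pos bounds k cnts p = PySem.List.pySetD cnts c X := by
          unfold pvStepB; rw [hg]; dsimp only; rw [← hcdef, if_pos hck, hX]
        rw [hstep, ihl _ (by rw [PySem.List.length_pySetD]; exact hlen)]
        have hcnat : c = ((c.toNat : Nat) : Int) := by omega
        by_cases hci : c = (i : Int)
        · have hbeq : (c == (i : Int)) = true := by simp [hci]
          simp only [hbeq, if_true, List.map_cons, List.foldl_cons]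
          have hgetX : PySem.List.pyGetD (PySem.List.pySetD cnts c X) (i : Int) [] = X := by
            rw [hcnat, PySem.List.pyGetD_pySetD_natCast cnts c.toNat i X [] hclt,
              if_pos (by omega)]
          rw [hgetX]
          have hrs : pvRowStep pos (PySem.List.pyGetD cnts (i : Int) []) p.2 = X := by
            unfold pvRowStep; rw [hg, hX, hci]
          rw [hrs]
        · have hbeq : (c == (i : Int)) = false := by simp [hci]
          simp only [hbeq, Bool.false_eq_true, if_false]
          have hget : PySem.List.pyGetD (PySem.List.pySetD cnts c X) (i : Int) []
              = PySem.List.pyGetD cnts (i : Int) [] := by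
            rw [hcnat, PySem.List.pyGetD_pySetD_natCast cnts c.toNat i X [] hclt,
              if_neg (by omega)]
          rw [hget]
      · have hstep : pvStepB pos bounds k cnts p = cnts := by
          unfold pvStepB; rw [hg]; dsimp only; rw [← hcdef, if_neg hck]
        have hbeq : (c == (i : Int)) = false := by
          simp only [beq_eq_false_iff_ne, ne_eq]
          omega
        rw [hstep]
        simp only [hbeq, Bool.false_eq_true, if_false]
        exact ihl cnts hlen

lemma pv_filter_pyRange (n a b : Int) (h0 : 0 ≤ a) :
    (PySem.List.pyRange 0 n 1).filter (fun j => decide (a ≤ j) && decide (j < b))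
      = PySem.List.pyRange a (min b n) 1 := by
  have hnd1 : ((PySem.List.pyRange 0 n 1).filter (fun j => decide (a ≤ j) && decide (j < b))).Nodup :=
    (PySem.List.nodup_pyRange_one 0 n).filter _
  have hperm : (PySem.List.pyRange a (min b n) 1).Perm
      ((PySem.List.pyRange 0 n 1).filter (fun j => decide (a ≤ j) && decide (j < b))) := by
    rw [List.perm_ext_iff_of_nodup (PySem.List.nodup_pyRange_one a (min b n)) hnd1]
    intro x
    rw [List.mem_filter, PySem.List.mem_pyRange_one, PySem.List.mem_pyRange_one]
    simp only [Bool.and_eq_true, decide_eq_true_eq]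
    omega
  have := PySem.List.sorted_eq_of_perm_of_pairwise_lt
    ((PySem.List.pyRange 0 n 1).filter (fun j => decide (a ≤ j) && decide (j < b)))
    (PySem.List.pyRange a (min b n) 1) (fun x => x) hperm
    (PySem.List.pairwise_lt_pyRange_one a (min b n))
  have h2 := PySem.List.sorted_eq_of_perm_of_pairwise_lt
    ((PySem.List.pyRange 0 n 1).filter (fun j => decide (a ≤ j) && decide (j < b)))
    ((PySem.List.pyRange 0 n 1).filter (fun j => decide (a ≤ j) && decide (j < b))) (fun x => x)
    (List.Perm.refl _) ((PySem.List.pairwise_lt_pyRange_one 0 n).filter _)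
  rw [← h2]
  exact this

lemma pv_map_getD_range' {α : Type} (l : List α) (d : α) :
    ∀ (m a : Nat), a + m ≤ l.length →
      (List.range' a m).map (fun j => l.getD j d) = (l.drop a).take m := by
  intro m
  induction m with
  | zero => intro a h; simp
  | succ m ih =>
    intro a h
    rw [List.range'_succ, List.map_cons, List.drop_eq_getElem_cons (by omega),
      List.take_succ_cons, ih (a + 1) (by omega), List.getD_eq_getElem l d (by omega)]

lemma pv_map_getD_pyRange {α : Type} (l : List α) (d : α) (a b : Int) (h0 : 0 ≤ a) (hab : a ≤ b) :
    (PySem.List.pyRange a (min b (l.length : Int)) 1).map (fun j => PySem.List.pyGetD l j d)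
      = PySem.List.slice l (some a) (some b) := by
  rw [PySem.List.slice_toNat l h0 (by omega)]
  by_cases hc : min b (l.length : Int) ≤ a
  · rw [PySem.List.pyRange_one_eq_nil hc]
    by_cases hb : b ≤ (l.length : Int)
    · rw [show b.toNat - a.toNat = 0 by omega, List.take_zero]
      simp
    · rw [List.drop_eq_nil_of_le (by omega), List.take_nil]
      simp
  · push Not at hc
    rw [PySem.List.pyRange_one a (min b (l.length : Int)), List.map_map]
    have hcomp : ((fun j => PySem.List.pyGetD l j d) ∘ (fun k : Nat => a + (k : Int)))
        = fun u : Nat => l.getD (a.toNat + u) d := by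
      funext u
      simp only [Function.comp_apply]
      rw [show a + (u : Int) = ((a.toNat + u : Nat) : Int) by omega, PySem.List.pyGetD_natCast]
    rw [hcomp]
    have h3 : (List.range ((min b (l.length : Int) - a).toNat)).map (fun u => l.getD (a.toNat + u) d)
        = (List.range' a.toNat ((min b (l.length : Int) - a).toNat)).map (fun j => l.getD j d) := by
      rw [List.range'_eq_map_range, List.map_map]
      rfl
    rw [h3, pv_map_getD_range' l d _ a.toNat (by omega)]
    by_cases hb : b ≤ (l.length : Int)
    · have heq : (min b (l.length : Int) - a).toNat = b.toNat - a.toNat := by omega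
      rw [heq]
    · have h1 : (min b (l.length : Int) - a).toNat = l.length - a.toNat := by omega
      have h2 : (List.drop a.toNat l).length ≤ l.length - a.toNat := by
        rw [List.length_drop]
      have h3 : (List.drop a.toNat l).length ≤ b.toNat - a.toNat := by
        rw [List.length_drop]; omega
      rw [h1, List.take_of_length_le h2, List.take_of_length_le h3]

lemma pv_pick_eq (classes : List String) (hc : classes ≠ []) (row : List Int)
    (hlen : row.length = classes.length) :
    (match PySem.List.max? row (fun v => v) with
     | none => ""
     | some mx =>
       match PySem.List.index? row mx with
       | none => ""
       | some j => PySem.List.pyGetD classes (j : Int) "") =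
      PySem.List.pyGetD classes (pvBestOf row) "" := by
  have hrow : row ≠ [] := by
    intro h
    apply hc
    rw [h] at hlen
    exact (List.eq_nil_of_length_eq_zero hlen.symm)
  obtain ⟨mx, hmx⟩ : ∃ mx, PySem.List.max? row (fun v => v) = some mx := by
    cases h : PySem.List.max? row (fun v => v) with
    | none => exact absurd ((PySem.List.max?_eq_none_iff row _).mp h) hrow
    | some m => exact ⟨m, rfl⟩
  have hmem := PySem.List.max?_mem hmx
  have hmax := PySem.List.max?_isMax hmx
  obtain ⟨j, hj⟩ : ∃ j, PySem.List.index? row mx = some j := by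
    cases h : PySem.List.index? row mx with
    | none => exact absurd ((PySem.List.index?_eq_none_iff row mx).mp h) (by simp [hmem])
    | some j => exact ⟨j, rfl⟩
  obtain ⟨hjlen, hjval, hjfirst⟩ := PySem.List.getElem_of_index?_eq_some hj
  obtain ⟨bn, hbn, hbnlen, hble, hblt⟩ := pv_best_spec row hrow
  have hbj : bn = j := by
    have h1 : row.getD bn 0 ≤ mx := by
      rw [List.getD_eq_getElem row 0 hbnlen]
      exact hmax _ (List.getElem_mem hbnlen)
    have h2 : mx ≤ row.getD bn 0 := by
      have := hble j hjlen
      rw [List.getD_eq_getElem row 0 hjlen, hjval] at this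
      exact this
    rcases lt_trichotomy bn j with h | h | h
    · exfalso
      apply hjfirst bn h
      rw [← List.getD_eq_getElem row 0 hbnlen]
      omega
    · exact h
    · exfalso
      have := hblt j h
      rw [List.getD_eq_getElem row 0 hjlen, hjval] at this
      omega
  simp only [hmx, hj, hbn, hbj]

lemma pv_stepA_eq (classes : List String) (pos : PySem.Dict String Int)
    (hpos : ∀ x, PySem.Dict.get? pos x = Option.map (fun u : Nat => (u : Int)) (PySem.List.index? classes x)) :
    ∀ (cc : List Int) (x : String),
      (if x ∈ classes then
        match PySem.List.index? classes x with
        | some idx => PySem.List.pySetD cc (idx : Int) (PySem.List.pyGetD cc (idx : Int) 0 + 1)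
        | none => cc
       else cc) = pvRowStep pos cc x := by
  intro cc x
  unfold pvRowStep
  rw [hpos x]
  by_cases hx : x ∈ classes
  · obtain ⟨idx, hidx⟩ : ∃ idx, PySem.List.index? classes x = some idx := by
      cases h : PySem.List.index? classes x with
      | none => exact absurd ((PySem.List.index?_eq_none_iff classes x).mp h) (by simp [hx])
      | some idx => exact ⟨idx, rfl⟩
    rw [if_pos hx, hidx]
    rfl
  · rw [if_neg hx, (PySem.List.index?_eq_none_iff classes x).mpr hx]
    rfl


lemma pv_most_common_eq (seg classes : List String) (pos : PySem.Dict String Int)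
    (hpos : ∀ x, PySem.Dict.get? pos x = Option.map (fun u : Nat => (u : Int)) (PySem.List.index? classes x))
    (hcne : classes ≠ []) :
    most_common seg classes
      = PySem.List.pyGetD classes
          (pvBestOf (seg.foldl (pvRowStep pos) (List.replicate classes.length 0))) "" := by
  unfold most_common
  dsimp only
  rw [PySem.List.pyRepeat_singleton]
  rw [show (PySem.List.len classes).toNat = classes.length by rw [PySem.List.len_eq]; omega]
  rw [PySem.List.foldl_congr_mem (PySem.List.pyRange 0 (PySem.List.len seg) 1) _
    (fun acc j => pvRowStep pos acc (PySem.List.pyGetD seg j "")) _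
    (fun acc j _ => pv_stepA_eq classes pos hpos acc _)]
  rw [PySem.List.foldl_pyRange_pyGetD seg "" (pvRowStep pos) _ (le_refl 0)]
  rw [show (0 : Int).toNat = 0 from rfl, List.drop_zero]
  exact pv_pick_eq classes hcne _ (by rw [pv_rowfold_len]; simp)

-- ===== VERDICT (by name: the statement is the Claim_ definition above) =====
theorem concentrate_moves_spec : Claim_equal_concentrate_moves := by
  intro move_list num_clusters classes hdom hpre
  unfold Spec_concentrate_moves
  obtain ⟨hk0, hclasses⟩ := hpre
  rcases lt_or_gt_of_ne hk0 with hneg | hpos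
  · -- num_clusters < 0: both loops are over an empty range
    unfold concentrate_moves concentrate_moves_alt
    rw [PySem.List.pyRange_one_eq_nil (show num_clusters ≤ (0 : Int) by omega)]
    simp
  · -- num_clusters > 0
    have hcne : classes ≠ [] := hclasses hpos
    set k := num_clusters with hk
    set cs := pvFDiv (PySem.List.len move_list) num_clusters with hcs
    have hcs1 : 0 ≤ cs.1 := by
      rw [hcs]
      exact pvFDiv_fst_nonneg (by rw [PySem.List.len_eq]; positivity) hpos
    set bounds := (PySem.List.pyRange 0 (num_clusters + 1) 1).map (fun i => pvFCeil (pvFMul i cs)) with hbounds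
    set pos := (PySem.List.enumerate classes 0).foldl
      (fun d p => if d.contains p.2 then d else d.insert p.2 p.1) PySem.Dict.empty with hposd
    have hpos_get := pv_pos_get classes
    rw [← hposd] at hpos_get
    have hbget : ∀ c : Int, 0 ≤ c → c ≤ k → PySem.List.pyGetD bounds c 0 = pvFCeil (pvFMul c cs) := by
      intro c h1 h2
      rw [hbounds]
      exact PySem.List.pyGetD_map_pyRange_of_nonneg _ (k + 1) c 0 h1 (by omega)
    -- A as a pair of maps
    have hA : concentrate_moves move_list num_clusters classes
        = ((PySem.List.pyRange 0 k 1).map (fun i =>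
              most_common (PySem.List.slice move_list (some (pvFCeil (pvFMul i cs)))
                (some (pvFCeil (pvFMul (i + 1) cs)))) classes),
           (PySem.List.pyRange 0 k 1).map (fun i =>
              [pvFCeil (pvFMul i cs), pvFCeil (pvFSub1 (pvFMul (i + 1) cs))])) := by
      unfold concentrate_moves
      rw [PySem.List.foldl_congr_mem (PySem.List.pyRange 0 k 1) _
        (fun (acc : List String × List (List Int)) i =>
          (acc.1 ++ [most_common (PySem.List.slice move_list (some (pvFCeil (pvFMul i cs)))
              (some (pvFCeil (pvFMul (i + 1) cs)))) classes],
           acc.2 ++ [[pvFCeil (pvFMul i cs), pvFCeil (pvFSub1 (pvFMul (i + 1) cs))]]))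
        ([], [])
        (fun acc i hi => by
          rw [if_neg (show ¬((i == num_clusters) = true) from by
            simp only [beq_iff_eq]
            have := PySem.List.mem_pyRange_one.mp hi
            omega)])]
      rw [PySem.List.foldl_prod_mk
        (f := fun (a : List String) i =>
          a ++ [most_common (PySem.List.slice move_list (some (pvFCeil (pvFMul i cs)))
            (some (pvFCeil (pvFMul (i + 1) cs)))) classes])
        (g := fun (a : List (List Int)) i =>
          a ++ [[pvFCeil (pvFMul i cs), pvFCeil (pvFSub1 (pvFMul (i + 1) cs))]])]
      rw [PySem.List.foldl_append_singleton_eq_map, PySem.List.foldl_append_singleton_eq_map]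
      simp
    rw [hA]
    -- B is definitionally a pair of maps
    show _ = ((PySem.List.pyRange 0 k 1).map (fun i =>
        PySem.List.pyGetD classes
          (pvBestOf (PySem.List.pyGetD
            ((PySem.List.enumerate move_list 0).foldl (pvStepB pos bounds k)
              ((PySem.List.pyRange 0 k 1).map
                (fun _ => PySem.List.pyRepeat [(0 : Int)] (PySem.List.len classes)))) i [])) ""),
      (PySem.List.pyRange 0 k 1).map (fun i =>
        [PySem.List.pyGetD bounds i 0, pvFCeil (pvFSub1 (pvFMul (i + 1) cs))]))
    rw [Prod.mk.injEq]
    constructor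
    · -- the move lists agree
      apply List.map_congr_left
      intro i hi
      obtain ⟨hi0, hik⟩ := PySem.List.mem_pyRange_one.mp hi
      have hiN : i = ((i.toNat : Nat) : Int) := by omega
      -- B's row i is the fold of pvRowStep over A's slice
      have hrow : PySem.List.pyGetD
            ((PySem.List.enumerate move_list 0).foldl (pvStepB pos bounds k)
              ((PySem.List.pyRange 0 k 1).map
                (fun _ => PySem.List.pyRepeat [(0 : Int)] (PySem.List.len classes)))) i []
          = (PySem.List.slice move_list (some (pvFCeil (pvFMul i cs)))
              (some (pvFCeil (pvFMul (i + 1) cs)))).foldl (pvRowStep pos)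
              (List.replicate classes.length 0) := by
        rw [hiN, pv_foldB_row pos bounds k i.toNat (by omega) (PySem.List.enumerate move_list 0) _
          (by rw [List.length_map, PySem.List.length_pyRange_one]; omega)]
        rw [PySem.List.pyGetD_map_pyRange_of_nonneg _ k ((i.toNat : Nat) : Int) [] (by omega) (by omega)]
        rw [PySem.List.pyRepeat_singleton,
          show (PySem.List.len classes).toNat = classes.length by rw [PySem.List.len_eq]; omega]
        congr 1
        -- the filtered, snd-projected enumeration is the slice
        rw [PySem.List.enumerate_eq_map_pyRange move_list "", List.filter_map, List.map_map]
        rw [List.filter_congr (q := fun j => decide (pvFCeil (pvFMul ((i.toNat : Nat) : Int) cs) ≤ j) &&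
              decide (j < pvFCeil (pvFMul (((i.toNat : Nat) : Int) + 1) cs)))
          (fun j hj => by
            obtain ⟨hj0, hjn⟩ := PySem.List.mem_pyRange_one.mp hj
            rw [Bool.eq_iff_iff]
            simp only [Function.comp_apply, beq_iff_eq, Bool.and_eq_true, decide_eq_true_eq]
            exact pv_cluster_iff cs hcs1 k hpos j hj0 ((i.toNat : Nat) : Int) (by omega) (by omega))]
        rw [PySem.List.len_eq]
        rw [pv_filter_pyRange (move_list.length : Int)
          (pvFCeil (pvFMul ((i.toNat : Nat) : Int) cs)) (pvFCeil (pvFMul (((i.toNat : Nat) : Int) + 1) cs))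
          (show (0 : Int) ≤ pvFCeil (pvFMul ((i.toNat : Nat) : Int) cs) from
            pv_bnd_nonneg cs hcs1 (by omega))]
        exact pv_map_getD_pyRange move_list "" _ _
          (show (0 : Int) ≤ pvFCeil (pvFMul ((i.toNat : Nat) : Int) cs) from
            pv_bnd_nonneg cs hcs1 (by omega))
          (show pvFCeil (pvFMul ((i.toNat : Nat) : Int) cs) ≤ pvFCeil (pvFMul (((i.toNat : Nat) : Int) + 1) cs) from
            pv_bnd_mono cs hcs1 (by omega) (by omega))
      rw [hrow]
      exact pv_most_common_eq _ classes pos hpos_get hcne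
    · -- the coordinate lists agree
      apply List.map_congr_left
      intro i hi
      obtain ⟨hi0, hik⟩ := PySem.List.mem_pyRange_one.mp hi
      rw [hbget i hi0 (by omega)]
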